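-- pv_equiv track=rewrite | github.com/unstableTreeBarkEater/RummyPlayer | player.py | get_of_a_kind_count
-- ===== SOURCE A (Python) =====
-- def get_of_a_kind_count(hand):
--     of_a_kind_count = [0, 0, 0, 0]  # how many 1 of a kind, 2 of a kind, etc. in our hand
--     last_val = hand[0][0]
--     count = 0
--     for card in hand[1:]:
--         cur_val = card[0]
--         if cur_val == last_val:
--             count += 1
--         else:
--             of_a_kind_count[count] += 1
--             count = 0
--         last_val = cur_val
--     of_a_kind_count[count] += 1  # Need to get the last card fully processed
--     return of_a_kind_count
-- ===== SOURCE B (Python) =====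
-- def get_of_a_kind_count(hand):
--     heads = [card[0] for card in hand]
--     n = len(heads)
--     bounds = [i for i in range(n) if i == 0 or heads[i] != heads[i - 1]] + [n]
--     of_a_kind_count = [0, 0, 0, 0]
--     for start, end in zip(bounds, bounds[1:]):
--         of_a_kind_count[end - start - 1] += 1
--     return of_a_kind_count
-- ===== Notes on version B (the rewrite author's own statement) =====
-- stated objective: alternative
-- what changed: B works in staged passes over an intermediate boundary-index list: it extracts the head values, builds the list of run-start indices with a filtered range, and buckets the pairwise differences of consecutive boundaries, instead of A's single pass carrying a last_val/count state machine.
import Mathlib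
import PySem

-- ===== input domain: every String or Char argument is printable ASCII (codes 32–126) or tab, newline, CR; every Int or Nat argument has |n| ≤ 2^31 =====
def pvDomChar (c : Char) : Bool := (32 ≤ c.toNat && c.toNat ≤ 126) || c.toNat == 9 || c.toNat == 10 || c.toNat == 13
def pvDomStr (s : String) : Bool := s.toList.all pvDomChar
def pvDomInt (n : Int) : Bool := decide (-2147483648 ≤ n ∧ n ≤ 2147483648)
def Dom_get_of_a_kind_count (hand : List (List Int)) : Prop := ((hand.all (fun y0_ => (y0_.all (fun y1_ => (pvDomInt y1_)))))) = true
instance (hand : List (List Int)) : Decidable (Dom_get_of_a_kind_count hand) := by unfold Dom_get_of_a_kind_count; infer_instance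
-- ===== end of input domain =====

-- B replaces A's per-card last_val/count state machine by staged passes over an intermediate
-- boundary-index list (objective: alternative decomposition, same cost).


-- ===== PORT A =====
-- `of_a_kind_count[count] += 1` (exact for count < 4; Pre_ guarantees every run has length ≤ 4)
def incAt (l : List Int) (i : Nat) : List Int := l.set i (l.getD i 0 + 1)

-- Literal port of A. hand[0][0] is ported as headD/headD (exact under Pre_: hand and its cards
-- are nonempty); hand[1:] is drop 1 (exact, nonnegative bounds).
def get_of_a_kind_count (hand : List (List Int)) : List Int :=
  let of_a_kind_count : List Int := [0, 0, 0, 0]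
  let last_val : Int := (hand.headD []).headD 0
  let s := (hand.drop 1).foldl
    (fun (st : List Int × Int × Nat) card =>
      let cur_val : Int := card.headD 0
      if cur_val == st.2.1 then (st.1, cur_val, st.2.2 + 1)
      else (incAt st.1 st.2.2, cur_val, 0))
    (of_a_kind_count, last_val, 0)
  incAt s.1 s.2.2

-- ===== PORT B =====
-- `[i for i in range(n) if i == 0 or heads[i] != heads[i-1]]` — the boundary (run-start) index
-- list of Source B; getD is exact: both indices are in range whenever Python evaluates them, and at
-- i = 0 the first disjunct short-circuits exactly as Python's `or` does.
def sb (l : List Int) : List Nat :=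
  (List.range l.length).filter (fun i => i == 0 || !(l.getD i 0 == l.getD (i - 1) 0))

-- Source B's final loop: `for start, end in zip(bounds, bounds[1:]): counts[end-start-1] += 1`
def bfold (counts : List Int) (bs : List Nat) : List Int :=
  (bs.zip bs.tail).foldl (fun c p => incAt c (p.2 - p.1 - 1)) counts

def get_of_a_kind_count_alt (hand : List (List Int)) : List Int :=
  let heads := hand.map (fun card => card.headD 0)   -- [card[0] for card in hand]
  bfold [0, 0, 0, 0] (sb heads ++ [heads.length])

-- ===== PRECONDITION & SPEC =====
-- Pre_ excludes exactly the inputs where Python A raises IndexError: the empty hand (hand[0]),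
-- a hand containing an empty card (card[0]), and a hand with 5+ consecutive equal values
-- (of_a_kind_count[count] with count >= 4).
def Pre_get_of_a_kind_count (hand : List (List Int)) : Prop :=
  hand ≠ [] ∧ (∀ c ∈ hand, c ≠ []) ∧
  ∀ i < hand.length, i + 4 < hand.length →
    ∃ j < 5, (hand.getD (i + j) []).headD 0 ≠ (hand.getD i []).headD 0

instance (hand : List (List Int)) : Decidable (Pre_get_of_a_kind_count hand) := by
  unfold Pre_get_of_a_kind_count; infer_instance

def pvWitness_get_of_a_kind_count : List (List Int) := [[1], [1], [2]]

def Spec_get_of_a_kind_count (hand : List (List Int)) (out : List Int) : Prop := out = get_of_a_kind_count_alt hand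
instance (hand : List (List Int)) (out : List Int) : Decidable (Spec_get_of_a_kind_count hand out) := by unfold Spec_get_of_a_kind_count; infer_instance

-- ===== CLAIM (what is proved, stated in full; the proofs are below) =====
def Claim_equal_get_of_a_kind_count : Prop := ∀ (hand : List (List Int)), Dom_get_of_a_kind_count hand → Pre_get_of_a_kind_count hand → Spec_get_of_a_kind_count hand (get_of_a_kind_count hand)

-- ===== LEMMAS AND PROOFS =====
-- heads of the cards
def hdv (c : List Int) : Int := c.headD 0

-- common reference function: fold over the maximal runs of the heads list
def addRuns (counts : List Int) : List Int → List Int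
  | [] => counts
  | v :: t => addRuns (incAt counts (t.takeWhile (· == v)).length) (t.dropWhile (· == v))
termination_by vs => vs.length
decreasing_by
  have := List.length_dropWhile_le (p := (· == v)) (l := t)
  simp; omega

theorem addRuns_nil (counts : List Int) : addRuns counts [] = counts := by
  simp [addRuns]

theorem addRuns_cons (counts : List Int) (v : Int) (t : List Int) :
    addRuns counts (v :: t) =
      addRuns (incAt counts (t.takeWhile (· == v)).length) (t.dropWhile (· == v)) := by
  simp [addRuns]

theorem takeWhile_replicate_self (a : Int) (k : Nat) (w : List Int)
    (h : ∀ x ∈ w.head?, (x == a) = false) :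
    (List.replicate k a ++ w).takeWhile (· == a) = List.replicate k a ∧
    (List.replicate k a ++ w).dropWhile (· == a) = w := by
  induction k with
  | zero =>
    cases w with
    | nil => simp
    | cons x t => simp_all
  | succ k ih =>
    simp [List.replicate_succ, ih]

theorem addRuns_run (counts : List Int) (a : Int) (k : Nat) (w : List Int)
    (h : ∀ x ∈ w.head?, (x == a) = false) :
    addRuns counts (a :: (List.replicate k a ++ w)) = addRuns (incAt counts k) w := by
  rw [addRuns_cons, (takeWhile_replicate_self a k w h).1, (takeWhile_replicate_self a k w h).2,
    List.length_replicate]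

theorem rep_shift (a : Int) (k : Nat) (L : List Int) :
    List.replicate k a ++ a :: L = a :: (List.replicate k a ++ L) := by
  induction k with
  | zero => simp
  | succ k ih => simp [List.replicate_succ, ih]

-- A's fold computes addRuns
theorem foldA_eq (cards : List (List Int)) :
    ∀ (counts : List Int) (last : Int) (cnt : Nat),
    (let s := cards.foldl
        (fun (st : List Int × Int × Nat) card =>
          let cur_val : Int := card.headD 0
          if cur_val == st.2.1 then (st.1, cur_val, st.2.2 + 1)
          else (incAt st.1 st.2.2, cur_val, 0))
        (counts, last, cnt) ;
      incAt s.1 s.2.2)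
    = addRuns counts (List.replicate cnt last ++ last :: cards.map hdv) := by
  induction cards with
  | nil =>
    intro counts last cnt
    simp only [List.foldl_nil, List.map_nil]
    show incAt counts cnt = addRuns counts (List.replicate cnt last ++ last :: [])
    rw [rep_shift, addRuns_run counts last cnt [] (by simp), addRuns_nil]
  | cons c cs ih =>
    intro counts last cnt
    simp only [List.foldl_cons, List.map_cons]
    by_cases hv : (c.headD 0 == last) = true
    · have he : c.headD 0 = last := by simpa using hv
      rw [if_pos hv, ih counts (c.headD 0) (cnt + 1)]
      congr 1
      simp only [hdv, he, List.replicate_succ, List.cons_append, rep_shift]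
    · rw [if_neg hv, ih (incAt counts cnt) (c.headD 0) 0]
      have hh : ∀ x ∈ (hdv c :: cs.map hdv).head?, (x == last) = false := by
        intro x hx
        simp only [List.head?_cons, Option.mem_some_iff] at hx
        subst hx
        simpa [hdv] using hv
      conv_rhs => rw [rep_shift, addRuns_run counts last cnt (hdv c :: cs.map hdv) hh]
      simp [hdv]

-- final A-side characterisation
theorem A_eq_addRuns (hand : List (List Int)) (h : hand ≠ []) :
    get_of_a_kind_count hand = addRuns [0, 0, 0, 0] (hand.map hdv) := by
  cases hand with
  | nil => exact absurd rfl h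
  | cons c cs =>
    simp only [get_of_a_kind_count, List.headD_cons, List.drop_succ_cons, List.drop_zero]
    rw [foldA_eq cs [0,0,0,0] (c.headD 0) 0]
    simp [hdv]

-- ===== B-side lemmas =====
theorem head?_dropWhile (p : Int → Bool) (t : List Int) :
    ∀ x ∈ (t.dropWhile p).head?, p x = false := by
  induction t with
  | nil => simp
  | cons a t ih =>
    intro x hx
    by_cases h : p a = true
    · rw [List.dropWhile_cons, if_pos h] at hx
      exact ih x hx
    · rw [List.dropWhile_cons, if_neg h] at hx
      simp only [List.head?_cons, Option.mem_some_iff] at hx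
      subst hx
      simpa using h

theorem takeWhile_eq_replicate (v : Int) (t : List Int) :
    t.takeWhile (· == v) = List.replicate (t.takeWhile (· == v)).length v := by
  apply List.eq_replicate_length.2
  intro b hb
  have := List.mem_takeWhile_imp hb
  simpa using this

-- the run's head values (index ≤ k of v :: (replicate k v ++ w)) are all v
theorem getD_run (v : Int) (k : Nat) (w : List Int) :
    ∀ i ≤ k, (v :: (List.replicate k v ++ w)).getD i 0 = v := by
  intro i hi
  cases i with
  | zero => rfl
  | succ j =>
    rw [List.getD_cons_succ, List.getD_append _ _ _ j (by simpa using hi),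
      List.getD_replicate _ (by omega)]

theorem filter_range_singleton (p : Nat → Bool) (k : Nat)
    (h0 : p 0 = true) (h : ∀ i, 1 ≤ i → i ≤ k → p i = false) :
    (List.range (k + 1)).filter p = [0] := by
  induction k with
  | zero => simp [List.range_succ, h0]
  | succ k ih =>
    rw [List.range_succ, List.filter_append]
    rw [ih (fun i h1 h2 => h i h1 (by omega))]
    simp [h (k + 1) (by omega) (by omega)]

-- the boundary list of one whole run followed by w
theorem sb_run (v : Int) (k : Nat) (w : List Int)
    (hw : ∀ x ∈ w.head?, (x == v) = false) :
    sb (v :: (List.replicate k v ++ w)) = 0 :: (sb w).map (fun j => (k + 1) + j) := by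
  set l := v :: (List.replicate k v ++ w) with hl
  have hlen : l.length = (k + 1) + w.length := by simp [hl]; omega
  unfold sb
  rw [hlen, List.range_add, List.filter_append]
  have h1 : (List.range (k + 1)).filter
      (fun i => i == 0 || !(l.getD i 0 == l.getD (i - 1) 0)) = [0] := by
    apply filter_range_singleton
    · rfl
    · intro i h1 h2
      rw [getD_run v k w i h2, getD_run v k w (i - 1) (by omega)]
      simp; omega
  have h2 : (List.filter (fun i => i == 0 || !(l.getD i 0 == l.getD (i - 1) 0))
        (List.map (fun x => k + 1 + x) (List.range w.length)))
      = (sb w).map (fun j => (k + 1) + j) := by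
    rw [List.filter_map]
    unfold sb
    congr 1
    apply List.filter_congr
    intro j hj
    have hjlt : j < w.length := by simpa using hj
    have hget : l.getD ((k + 1) + j) 0 = w.getD j 0 := by
      have he : (k + 1) + j = (k + j) + 1 := by omega
      rw [he, hl, List.getD_cons_succ,
        List.getD_append_right _ _ _ (k + j) (by simp),
        List.length_replicate]
      congr 1
      omega
    cases j with
    | zero =>
      have hx : (w.getD 0 0 == v) = false := by
        cases w with
        | nil => simp at hjlt
        | cons x t => exact hw x (by simp)
      have hprev : l.getD ((k + 1) + 0 - 1) 0 = v := by
        have he : (k + 1) + 0 - 1 = k := by omega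
        rw [he]
        exact getD_run v k w k (le_refl k)
      simp only [Function.comp, Nat.add_zero] at hget ⊢
      rw [show ((k + 1) == 0) = false by simp]
      simp only [Bool.false_or]
      simp only [Nat.add_zero] at hprev
      rw [hget, hprev, hx]
      rfl
    | succ j' =>
      simp only [Function.comp]
      have hprev : l.getD ((k + 1) + (j' + 1) - 1) 0 = w.getD j' 0 := by
        have he : (k + 1) + (j' + 1) - 1 = (k + j') + 1 := by omega
        rw [he, hl, List.getD_cons_succ,
          List.getD_append_right _ _ _ (k + j') (by simp),
          List.length_replicate]
        congr 1
        omega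
      rw [show ((k + 1 + (j' + 1)) == 0) = false by simp]
      rw [show ((j' + 1 : Nat) == 0) = false by simp]
      simp only [Bool.false_or]
      rw [hget, hprev]
      rfl
  rw [h1, h2]
  rfl

-- sb w ++ [w.length] always starts with 0
theorem bw_cons (w : List Int) : ∃ t, sb w ++ [w.length] = 0 :: t := by
  cases w with
  | nil => exact ⟨[], rfl⟩
  | cons x xs =>
    refine ⟨((List.range xs.length).map Nat.succ).filter
        (fun i => i == 0 || !((x :: xs).getD i 0 == (x :: xs).getD (i - 1) 0))
      ++ [xs.length + 1], ?_⟩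
    unfold sb
    rw [List.length_cons, List.range_succ_eq_map, List.filter_cons]
    have h0 : ((0 : Nat) == 0 || !((x :: xs).getD 0 0 == (x :: xs).getD (0 - 1) 0)) = true := rfl
    rw [if_pos h0, List.cons_append]

-- shifting every boundary by a constant does not change the pairwise differences
theorem bfold_map_shift (m : Nat) (counts : List Int) (bs : List Nat) :
    bfold counts (bs.map (fun j => m + j)) = bfold counts bs := by
  unfold bfold
  rw [← List.map_tail, List.zip_map, List.foldl_map]
  congr 1
  funext c p
  simp only [Prod.map]
  congr 1
  omega

-- B's staged computation equals the run fold
theorem bfold_main (counts : List Int) (l : List Int) :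
    bfold counts (sb l ++ [l.length]) = addRuns counts l := by
  fun_induction addRuns counts l with
  | case1 counts =>
    simp [bfold, sb]
  | case2 counts v t ih =>
    set k := (t.takeWhile (· == v)).length with hk
    set w := t.dropWhile (· == v) with hwdef
    have ht : t = List.replicate k v ++ w := by
      conv_lhs => rw [← List.takeWhile_append_dropWhile (p := (· == v)) (l := t)]
      rw [← hwdef, hk, ← takeWhile_eq_replicate]
    have hw : ∀ x ∈ w.head?, (x == v) = false := head?_dropWhile _ t
    have hsb : sb (v :: t) = 0 :: (sb w).map (fun j => (k + 1) + j) := by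
      rw [ht]
      exact sb_run v k w hw
    have hlen : (v :: t).length = (k + 1) + w.length := by
      rw [ht]; simp; omega
    obtain ⟨t', htw⟩ := bw_cons w
    have hmap : (sb w).map (fun j => (k + 1) + j) ++ [(k + 1) + w.length]
        = (sb w ++ [w.length]).map (fun j => (k + 1) + j) := by
      rw [List.map_append]
      rfl
    have hstep : bfold counts (0 :: ((0 :: t').map (fun j => (k + 1) + j)))
        = bfold (incAt counts ((k + 1) + 0 - 0 - 1)) ((0 :: t').map (fun j => (k + 1) + j)) := by
      unfold bfold
      simp only [List.map_cons, List.tail_cons, List.zip_cons_cons, List.foldl_cons]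
    calc bfold counts (sb (v :: t) ++ [(v :: t).length])
        = bfold counts (0 :: ((0 :: t').map (fun j => (k + 1) + j))) := by
          rw [hsb, hlen, List.cons_append, hmap, htw]
      _ = bfold (incAt counts ((k + 1) + 0 - 0 - 1)) ((0 :: t').map (fun j => (k + 1) + j)) := hstep
      _ = bfold (incAt counts k) ((0 :: t').map (fun j => (k + 1) + j)) := by
          have he : (k + 1) + 0 - 0 - 1 = k := by omega
          rw [he]
      _ = bfold (incAt counts k) (0 :: t') := bfold_map_shift (k + 1) _ _
      _ = bfold (incAt counts k) (sb w ++ [w.length]) := by rw [htw]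
      _ = addRuns (incAt counts k) w := ih

-- ===== VERDICT (by name: the statement is the Claim_ definition above) =====
theorem get_of_a_kind_count_spec : Claim_equal_get_of_a_kind_count := by
  intro hand hDom hPre
  unfold Spec_get_of_a_kind_count
  rw [A_eq_addRuns hand hPre.1]
  unfold get_of_a_kind_count_alt
  rw [bfold_main]
  rfl
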